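-- pv_equiv track=rewrite | github.com/FlaviaTironi/EP2-Yacht-Dice | funcoes.py | calcula_pontos_quadra
-- ===== SOURCE A (Python) =====
-- def calcula_pontos_quadra(dados):
--     repetições = {}
--     soma = 0
--
--     for d in dados:
--         soma += d
--
--     for d in dados:
--         if d in repetições:
--             repetições[d] += 1
--         else:
--             repetições[d] = 1
--
--     quadra = False
--     for valor in repetições.values():
--         if valor >= 4:
--             quadra = True
--
--     if quadra:
--         resultado = soma
--     else:
--         resultado = 0
--
--     return resultado
-- ===== SOURCE B (Python) =====
-- def calcula_pontos_quadra(dados):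
--     s = sorted(dados)
--     if any(s[i] == s[i + 3] for i in range(len(s) - 3)):
--         return sum(dados)
--     return 0
-- ===== Notes on version B (the rewrite author's own statement) =====
-- stated objective: alternative
-- what changed: Replaces the frequency dictionary and the three explicit loops with a sort: in sorted order a value occurring four times makes s[i] == s[i+3] for some i, so one any() over the sorted list decides the quadra.
import Mathlib
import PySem

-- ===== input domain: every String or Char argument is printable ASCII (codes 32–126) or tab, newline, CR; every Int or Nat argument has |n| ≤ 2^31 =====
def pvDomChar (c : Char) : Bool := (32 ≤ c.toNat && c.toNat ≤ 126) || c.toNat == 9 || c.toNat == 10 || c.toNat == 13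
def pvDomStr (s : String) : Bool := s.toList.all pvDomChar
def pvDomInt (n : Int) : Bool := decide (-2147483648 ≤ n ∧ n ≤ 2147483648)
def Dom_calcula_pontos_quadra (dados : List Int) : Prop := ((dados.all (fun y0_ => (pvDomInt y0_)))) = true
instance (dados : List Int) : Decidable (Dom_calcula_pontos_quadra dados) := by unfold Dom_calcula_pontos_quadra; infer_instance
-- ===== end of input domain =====

-- B replaces A's frequency dictionary and three loops with a sort plus one scan for s[i] == s[i+3]; alternative algorithm, same return value.


-- ===== PORT A =====
def calcula_pontos_quadra (dados : List Int) : Int :=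
  -- soma loop
  let soma : Int := dados.foldl (fun s d => s + d) 0
  -- counting loop over the dict 'repetições'
  let rep : PySem.Dict Int Int :=
    dados.foldl
      (fun r d =>
        if r.contains d then r.insert d ((r.get? d).getD 0 + 1)
        else r.insert d 1)
      PySem.Dict.empty
  -- scan of repetições.values()
  let quadra : Bool := rep.values.foldl (fun q v => if v ≥ 4 then true else q) false
  if quadra then soma else 0

-- ===== PORT B =====
def calcula_pontos_quadra_alt (dados : List Int) : Int :=
  let s := PySem.List.sorted dados (fun x => x) false
  -- any(s[i] == s[i + 3] for i in range(len(s) - 3)); every index the range produces is in bounds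
  if (PySem.List.pyRange 0 ((s.length : Int) - 3)).any
      (fun i => PySem.List.pyGet? s i == PySem.List.pyGet? s (i + 3))
  then dados.sum else 0

-- ===== PRECONDITION & SPEC =====
def Spec_calcula_pontos_quadra (dados : List Int) (out : Int) : Prop := out = calcula_pontos_quadra_alt dados
instance (dados : List Int) (out : Int) : Decidable (Spec_calcula_pontos_quadra dados out) := by unfold Spec_calcula_pontos_quadra; infer_instance

-- ===== CLAIM (what is proved, stated in full; the proofs are below) =====
def Claim_equal_calcula_pontos_quadra : Prop := ∀ (dados : List Int), Dom_calcula_pontos_quadra dados → Spec_calcula_pontos_quadra dados (calcula_pontos_quadra dados)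

-- ===== LEMMAS AND PROOFS =====

-- A's counting step is the standard counter step (the membership branch is redundant).
lemma stepA_eq_counter_step :
    (fun (r : PySem.Dict Int Int) (d : Int) =>
        if r.contains d then r.insert d ((r.get? d).getD 0 + 1)
        else r.insert d 1)
      = fun (r : PySem.Dict Int Int) (d : Int) => r.insert d (r.getD d 0 + 1) := by
  funext r d
  by_cases h : r.contains d = true
  · simp [h, PySem.Dict.getD_eq_get?_getD]
  · have h' : r.contains d = false := by simpa using h
    rw [h', PySem.Dict.getD_of_not_contains r (0 : Int) h']
    norm_num

-- A's quadra loop is 'any value ≥ 4'.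
lemma foldl_quadra (l : List Int) (b : Bool) :
    l.foldl (fun q v => if v ≥ 4 then true else q) b
      = (b || l.any (fun v => decide (4 ≤ v))) := by
  induction l generalizing b with
  | nil => simp
  | cons x xs ih =>
      simp only [List.foldl_cons, List.any_cons, ih]
      by_cases h : (4 : Int) ≤ x <;> simp [h]

-- In the sorted copy of dados, a 3-apart pair of equal entries exists iff some value occurs ≥ 4 times.
lemma gap_iff (dados : List Int) :
    (∃ i : Nat, i + 3 < (PySem.List.sorted dados (fun x => x) false).length ∧
        (PySem.List.sorted dados (fun x => x) false)[i]?
          = (PySem.List.sorted dados (fun x => x) false)[i + 3]?)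
      ↔ ∃ v ∈ dados, 4 ≤ List.count v dados := by
  have hperm := PySem.List.sorted_perm dados (fun x => x) false
  have hmono : ∀ {p q : Nat} (hpq : p ≤ q)
      (hq : q < (PySem.List.sorted dados (fun x => x) false).length),
      (PySem.List.sorted dados (fun x => x) false)[p]'(Nat.lt_of_le_of_lt hpq hq)
        ≤ (PySem.List.sorted dados (fun x => x) false)[q] :=
    fun hpq hq => PySem.List.sorted_id_getElem_mono dados hpq hq
  set S := PySem.List.sorted dados (fun x => x) false with hS
  constructor
  · rintro ⟨i, hlen, heq⟩
    rw [List.getElem?_eq_getElem (by omega), List.getElem?_eq_getElem hlen,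
        Option.some_inj] at heq
    refine ⟨S[i]'(by omega), ?_, ?_⟩
    case refine_2 =>
      have hsub : List.Sublist (List.replicate 4 (S[i]'(by omega))) S := by
        have htd : (S.drop i).take 4 = List.replicate 4 (S[i]'(by omega)) := by
          apply List.ext_getElem
          · simp; omega
          · intro k h1 h2
            simp only [List.length_take, List.length_drop, lt_min_iff] at h1
            simp only [List.getElem_take, List.getElem_drop, List.getElem_replicate]
            have hm1 : S[i]'(by omega) ≤ S[i + k]'(by omega) := hmono (by omega) (by omega)
            have hm2 : S[i + k]'(by omega) ≤ S[i + 3]'hlen := hmono (by omega) hlen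
            omega
        rw [← htd]
        exact ((S.drop i).take_sublist 4).trans (S.drop_sublist i)
      have hc : 4 ≤ List.count (S[i]'(by omega)) S := List.replicate_sublist_iff.mp hsub
      rwa [hperm.count_eq] at hc
    case refine_1 =>
      exact hperm.mem_iff.mp (List.getElem_mem _)
  · rintro ⟨v, _, hc⟩
    have hc' : 4 ≤ List.count v S := by rw [hperm.count_eq]; exact hc
    obtain ⟨is, heq, hpw⟩ := List.sublist_eq_map_getElem (List.replicate_sublist_iff.mpr hc')
    have hlen4 : is.length = 4 := by
      have := congrArg List.length heq
      simpa using this.symm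
    match is, hlen4 with
    | [a, b, c, d], _ =>
      simp only [List.map_cons, List.map_nil, List.replicate, List.cons.injEq] at heq
      obtain ⟨ha, hb, hc2, hd, -⟩ := heq
      simp only [List.pairwise_cons, List.mem_cons] at hpw
      have hab : (a : Nat) < (b : Nat) := hpw.1 b (by simp)
      have hbc : (b : Nat) < (c : Nat) := hpw.2.1 c (by simp)
      have hcd : (c : Nat) < (d : Nat) := hpw.2.2.1 d (by simp)
      have hdlt : (d : Nat) < S.length := d.isLt
      refine ⟨(a : Nat), by omega, ?_⟩
      rw [List.getElem?_eq_getElem (by omega), List.getElem?_eq_getElem (by omega),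
          Option.some_inj]
      have hm1 : S[(a : Nat)]'(by omega) ≤ S[(a : Nat) + 3]'(by omega) :=
        hmono (by omega) (by omega)
      have hm2 : S[(a : Nat) + 3]'(by omega) ≤ S[(d : Nat)]'(by omega) :=
        hmono (by omega) (by omega)
      have hav : v = S[(a : Nat)]'(by omega) := ha
      have hdv : v = S[(d : Nat)]'(by omega) := hd
      omega

-- B's any() over range(len(s) - 3) is that 3-apart equal pair.
lemma anyB_iff (dados : List Int) :
    ((PySem.List.pyRange 0 (((PySem.List.sorted dados (fun x => x) false).length : Int) - 3)).any
        (fun i => PySem.List.pyGet? (PySem.List.sorted dados (fun x => x) false) i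
          == PySem.List.pyGet? (PySem.List.sorted dados (fun x => x) false) (i + 3)) = true)
      ↔ (∃ i : Nat, i + 3 < (PySem.List.sorted dados (fun x => x) false).length ∧
          (PySem.List.sorted dados (fun x => x) false)[i]?
            = (PySem.List.sorted dados (fun x => x) false)[i + 3]?) := by
  set S := PySem.List.sorted dados (fun x => x) false with hS
  rw [List.any_eq_true]
  constructor
  · rintro ⟨i, hmem, hbeq⟩
    rw [PySem.List.mem_pyRange_one] at hmem
    obtain ⟨h0, hlt⟩ := hmem
    have e1 : PySem.List.pyGet? S i = S[i.toNat]? := by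
      simp [PySem.List.pyGet?, PySem.List.pyIdx?, h0, show i < (S.length : Int) by omega]
    have e2 : PySem.List.pyGet? S (i + 3) = S[i.toNat + 3]? := by
      have ht : (i + 3).toNat = i.toNat + 3 := by omega
      simp [PySem.List.pyGet?, PySem.List.pyIdx?, show (0:Int) ≤ i + 3 by omega,
        show i + 3 < (S.length : Int) by omega, ht]
    rw [e1, e2, beq_iff_eq] at hbeq
    exact ⟨i.toNat, by omega, hbeq⟩
  · rintro ⟨j, hj, heq⟩
    refine ⟨(j : Int), ?_, ?_⟩
    · rw [PySem.List.mem_pyRange_one]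
      constructor <;> [positivity; omega]
    · have e1 : PySem.List.pyGet? S (j : Int) = S[j]? := by
        simp [PySem.List.pyGet?, PySem.List.pyIdx?, show ((j : Int)) < (S.length : Int) by omega]
      have e2 : PySem.List.pyGet? S ((j : Int) + 3) = S[j + 3]? := by
        have ht : ((j : Int) + 3).toNat = j + 3 := by omega
        simp [PySem.List.pyGet?, PySem.List.pyIdx?, show (0:Int) ≤ (j : Int) + 3 by omega,
          show (j : Int) + 3 < (S.length : Int) by omega, ht]
      rw [e1, e2, beq_iff_eq]
      exact heq

theorem calcula_pontos_quadra_spec : Claim_equal_calcula_pontos_quadra := by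
  intro dados _
  show calcula_pontos_quadra dados = calcula_pontos_quadra_alt dados
  simp only [calcula_pontos_quadra, calcula_pontos_quadra_alt]
  rw [stepA_eq_counter_step, PySem.Dict.foldl_insert_getD_add_one_eq_counter,
      PySem.List.foldl_add dados (fun d => d) 0, foldl_quadra]
  have hv : (PySem.Dict.counter dados).values
      = (PySem.Set.ofList dados).map (fun k => ((List.count k dados : Nat) : Int)) := by
    show (PySem.Dict.counter dados).items.map (·.2) = _
    rw [PySem.Dict.items_counter]
    simp
  rw [hv]
  simp only [List.any_map, Function.comp_def, Bool.false_or, List.map_id_fun', id_eq,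
    zero_add]
  by_cases hq : ∃ v ∈ dados, 4 ≤ List.count v dados
  · obtain ⟨d, hd, hc⟩ := hq
    have h1 : ((PySem.Set.ofList dados : List Int).any
        (fun k => decide (4 ≤ ((List.count k dados : Nat) : Int)))) = true := by
      rw [List.any_eq_true]
      exact ⟨d, (PySem.Set.mem_ofList dados d).2 hd, by simp; exact_mod_cast hc⟩
    have h2 := (anyB_iff dados).2 ((gap_iff dados).2 ⟨d, hd, hc⟩)
    rw [h1, h2]
  · have h1 : ((PySem.Set.ofList dados : List Int).any
        (fun k => decide (4 ≤ ((List.count k dados : Nat) : Int)))) = false := by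
      rw [List.any_eq_false]
      intro k hk
      have hnk : ¬ (4 ≤ List.count k dados) := by
        intro hge
        exact hq ⟨k, (PySem.Set.mem_ofList dados k).1 hk, hge⟩
      simp
      omega
    have h2 : ((PySem.List.pyRange 0 (((PySem.List.sorted dados (fun x => x) false).length : Int) - 3)).any
        (fun i => PySem.List.pyGet? (PySem.List.sorted dados (fun x => x) false) i
          == PySem.List.pyGet? (PySem.List.sorted dados (fun x => x) false) (i + 3))) = false := by
      rw [Bool.eq_false_iff]
      intro ht
      exact hq ((gap_iff dados).1 ((anyB_iff dados).1 ht))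
    rw [h1, h2]
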